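-- pv_equiv track=rewrite | github.com/animalcule-millican/microbiome_seq_depth | pydepth/sort_reads.py | sort_runs
-- ===== SOURCE A (Python) =====
-- def sort_runs(input_dict):
--     """
--     Sort the reads into separate dictionaries based on the runID.
--     These  runIDs are unique to this set of samples. The set will have to be updated if applied to a different set of sequence files.
--     """
--     run_list = set(['000000000-KGKJV', '000000000-KGTPY', '000000000-KGK8M', '000000000-KGMFM', '000000000-KGMYV', '000000000-KHNNM'])
--     run_1 = {}
--     run_2 = {}
--     run_3 = {}
--     run_4 = {}
--     run_5 = {}
--     run_6 = {}
--     for key in input_dict: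
--         if input_dict[key]["runID"] == "000000000-KGKJV":
--             run_1[key] = input_dict[key]
--         elif input_dict[key]["runID"] == "000000000-KGTPY":
--             run_2[key] = input_dict[key]
--         elif input_dict[key]["runID"] == "000000000-KGK8M":
--             run_3[key] = input_dict[key]
--         elif input_dict[key]["runID"] == "000000000-KGMFM":
--             run_4[key] = input_dict[key]
--         elif input_dict[key]["runID"] == "000000000-KGMYV":
--             run_5[key] = input_dict[key]
--         elif input_dict[key]["runID"] == "000000000-KHNNM":
--             run_6[key] = input_dict[key]
--     return run_1, run_2, run_3, run_4, run_5, run_6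
-- ===== SOURCE B (Python) =====
-- def sort_runs(input_dict):
--     def reads_of(run):
--         # one full pass over the input per run: keep the reads of that run
--         return {key: val for key, val in input_dict.items() if val["runID"] == run}
--     return (reads_of('000000000-KGKJV'),
--             reads_of('000000000-KGTPY'),
--             reads_of('000000000-KGK8M'),
--             reads_of('000000000-KGMFM'),
--             reads_of('000000000-KGMYV'),
--             reads_of('000000000-KHNNM'))
-- ===== Notes on version B (the rewrite author's own statement) =====
-- stated objective: alternative
-- what changed: A makes one pass dispatching each read into six separate accumulators via an elif chain; B makes six independent filter passes, one dict comprehension per known runID, with no accumulator state at all.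
import Mathlib
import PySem

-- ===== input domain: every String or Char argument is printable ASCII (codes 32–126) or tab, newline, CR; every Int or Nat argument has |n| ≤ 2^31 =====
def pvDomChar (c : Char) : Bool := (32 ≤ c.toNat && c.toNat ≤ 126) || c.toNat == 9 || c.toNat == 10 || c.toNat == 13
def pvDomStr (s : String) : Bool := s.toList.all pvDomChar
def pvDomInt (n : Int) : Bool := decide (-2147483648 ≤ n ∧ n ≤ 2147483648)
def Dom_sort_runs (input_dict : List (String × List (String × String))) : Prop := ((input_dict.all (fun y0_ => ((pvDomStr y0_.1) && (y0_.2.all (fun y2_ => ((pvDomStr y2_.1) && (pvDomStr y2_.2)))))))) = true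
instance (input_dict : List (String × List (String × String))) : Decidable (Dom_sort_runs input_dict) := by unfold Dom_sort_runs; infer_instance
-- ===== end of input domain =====

-- B replaces A's single dispatching pass (six accumulators, elif chain) by six independent
-- filter passes, one dict comprehension per known runID (objective: alternative).

abbrev PVRow := List (String × String)                 -- one read's inner dict, as an association list
abbrev PVD := PySem.Dict String PVRow                  -- a run's accumulator dict
abbrev PVS6 := PVD × PVD × PVD × PVD × PVD × PVD

-- ===== PORT A =====
-- loop body of A: look the key up in input_dict, read its "runID", dispatch over the elif chain.
-- The 'none' branches are where the Python raises (KeyError on a read without "runID"; the outer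
-- lookup cannot fail for a key of the dict) — excluded by Pre_.
def pvStepA (input_dict : List (String × PVRow)) (st : PVS6) (key : String) : PVS6 :=
  match (PySem.Dict.mk input_dict).get? key with
  | none => st
  | some v =>
    match (PySem.Dict.mk v).get? "runID" with
    | none => st
    | some r =>
      if r = "000000000-KGKJV" then (st.1.insert key v, st.2.1, st.2.2.1, st.2.2.2.1, st.2.2.2.2.1, st.2.2.2.2.2)
      else if r = "000000000-KGTPY" then (st.1, st.2.1.insert key v, st.2.2.1, st.2.2.2.1, st.2.2.2.2.1, st.2.2.2.2.2)
      else if r = "000000000-KGK8M" then (st.1, st.2.1, st.2.2.1.insert key v, st.2.2.2.1, st.2.2.2.2.1, st.2.2.2.2.2)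
      else if r = "000000000-KGMFM" then (st.1, st.2.1, st.2.2.1, st.2.2.2.1.insert key v, st.2.2.2.2.1, st.2.2.2.2.2)
      else if r = "000000000-KGMYV" then (st.1, st.2.1, st.2.2.1, st.2.2.2.1, st.2.2.2.2.1.insert key v, st.2.2.2.2.2)
      else if r = "000000000-KHNNM" then (st.1, st.2.1, st.2.2.1, st.2.2.2.1, st.2.2.2.2.1, st.2.2.2.2.2.insert key v)
      else st

-- (A's 'run_list' local set is never used by the loop, so it leaves no trace in the port)
def pvExtract6 (st : PVS6) : (List (String × PVRow)) × (List (String × PVRow)) × (List (String × PVRow)) × (List (String × PVRow)) × (List (String × PVRow)) × (List (String × PVRow)) :=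
  (st.1.items, st.2.1.items, st.2.2.1.items, st.2.2.2.1.items, st.2.2.2.2.1.items, st.2.2.2.2.2.items)

def sort_runs (input_dict : List (String × List (String × String))) : (List (String × List (String × String))) × (List (String × List (String × String))) × (List (String × List (String × String))) × (List (String × List (String × String))) × (List (String × List (String × String))) × (List (String × List (String × String))) :=
  pvExtract6 ((input_dict.map Prod.fst).foldl (pvStepA input_dict)
      (PySem.Dict.empty, PySem.Dict.empty, PySem.Dict.empty, PySem.Dict.empty, PySem.Dict.empty, PySem.Dict.empty))

-- ===== PORT B =====
-- one filter pass: the dict comprehension {k: v for k, v in items if v["runID"] == run}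
-- ('none' = Python's KeyError on a read without "runID", excluded by Pre_)
def pvFilt (run : String) (d : PVD) (kv : String × PVRow) : PVD :=
  match (PySem.Dict.mk kv.2).get? "runID" with
  | none => d
  | some r => if r = run then d.insert kv.1 kv.2 else d

def pvReadsOf (run : String) (input_dict : List (String × PVRow)) : List (String × PVRow) :=
  (input_dict.foldl (pvFilt run) PySem.Dict.empty).items

def sort_runs_alt (input_dict : List (String × List (String × String))) : (List (String × List (String × String))) × (List (String × List (String × String))) × (List (String × List (String × String))) × (List (String × List (String × String))) × (List (String × List (String × String))) × (List (String × List (String × String))) :=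
  (pvReadsOf "000000000-KGKJV" input_dict,
   pvReadsOf "000000000-KGTPY" input_dict,
   pvReadsOf "000000000-KGK8M" input_dict,
   pvReadsOf "000000000-KGMFM" input_dict,
   pvReadsOf "000000000-KGMYV" input_dict,
   pvReadsOf "000000000-KHNNM" input_dict)

-- ===== PRECONDITION & SPEC =====
-- Pre_ excludes (a) reads without a "runID" entry, on which the Python A (and B) raises KeyError, and
-- (b) association lists with duplicate outer keys, which do not represent any Python dict input at all.
def Pre_sort_runs (input_dict : List (String × List (String × String))) : Prop :=
  (input_dict.map Prod.fst).Nodup ∧ ∀ p ∈ input_dict, ((PySem.Dict.mk p.2).get? "runID").isSome = true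
instance (input_dict : List (String × List (String × String))) : Decidable (Pre_sort_runs input_dict) := by unfold Pre_sort_runs; infer_instance

def pvWitness_sort_runs : (List (String × List (String × String))) :=
  [("r1", [("runID", "000000000-KGKJV"), ("len", "250")]), ("r2", [("runID", "zzz")])]

def Spec_sort_runs (input_dict : List (String × List (String × String))) (out : (List (String × List (String × String))) × (List (String × List (String × String))) × (List (String × List (String × String))) × (List (String × List (String × String))) × (List (String × List (String × String))) × (List (String × List (String × String)))) : Prop := out = sort_runs_alt input_dict
instance (input_dict : List (String × List (String × String))) (out : (List (String × List (String × String))) × (List (String × List (String × String))) × (List (String × List (String × String))) × (List (String × List (String × String))) × (List (String × List (String × String))) × (List (String × List (String × String)))) : Decidable (Spec_sort_runs input_dict out) := by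
  unfold Spec_sort_runs
  letI h5 : DecidableEq (List (String × PVRow) × List (String × PVRow)) := instDecidableEqProd
  letI h4 : DecidableEq (List (String × PVRow) × List (String × PVRow) × List (String × PVRow)) := instDecidableEqProd
  letI h3 : DecidableEq (List (String × PVRow) × List (String × PVRow) × List (String × PVRow) × List (String × PVRow)) := instDecidableEqProd
  letI h2 : DecidableEq (List (String × PVRow) × List (String × PVRow) × List (String × PVRow) × List (String × PVRow) × List (String × PVRow)) := instDecidableEqProd
  letI h1 : DecidableEq (List (String × PVRow) × List (String × PVRow) × List (String × PVRow) × List (String × PVRow) × List (String × PVRow) × List (String × PVRow)) := instDecidableEqProd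
  exact h1 _ _

-- ===== CLAIM (what is proved, stated in full; the proofs are below) =====
def Claim_equal_sort_runs : Prop := ∀ (input_dict : List (String × List (String × String))), Dom_sort_runs input_dict → Pre_sort_runs input_dict → Spec_sort_runs input_dict (sort_runs input_dict)

-- ===== LEMMAS AND PROOFS =====

-- the pair-driven version of A's step (value taken from the pair instead of the lookup)
def pvStepP (st : PVS6) (kv : String × PVRow) : PVS6 :=
  match (PySem.Dict.mk kv.2).get? "runID" with
  | none => st
  | some r =>
    if r = "000000000-KGKJV" then (st.1.insert kv.1 kv.2, st.2.1, st.2.2.1, st.2.2.2.1, st.2.2.2.2.1, st.2.2.2.2.2)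
    else if r = "000000000-KGTPY" then (st.1, st.2.1.insert kv.1 kv.2, st.2.2.1, st.2.2.2.1, st.2.2.2.2.1, st.2.2.2.2.2)
    else if r = "000000000-KGK8M" then (st.1, st.2.1, st.2.2.1.insert kv.1 kv.2, st.2.2.2.1, st.2.2.2.2.1, st.2.2.2.2.2)
    else if r = "000000000-KGMFM" then (st.1, st.2.1, st.2.2.1, st.2.2.2.1.insert kv.1 kv.2, st.2.2.2.2.1, st.2.2.2.2.2)
    else if r = "000000000-KGMYV" then (st.1, st.2.1, st.2.2.1, st.2.2.2.1, st.2.2.2.2.1.insert kv.1 kv.2, st.2.2.2.2.2)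
    else if r = "000000000-KHNNM" then (st.1, st.2.1, st.2.2.1, st.2.2.2.1, st.2.2.2.2.1, st.2.2.2.2.2.insert kv.1 kv.2)
    else st

lemma pvFoldA_eq_foldP (big : List (String × PVRow)) :
    ∀ (l : List (String × PVRow)), (∀ p ∈ l, (PySem.Dict.mk big).get? p.1 = some p.2) →
    ∀ st : PVS6, (l.map Prod.fst).foldl (pvStepA big) st = l.foldl pvStepP st := by
  intro l
  induction l with
  | nil => intro _ st; rfl
  | cons hd tl ih =>
    intro h st
    have hhd : (PySem.Dict.mk big).get? hd.1 = some hd.2 := h hd (by simp)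
    simp only [List.map_cons, List.foldl_cons]
    rw [show pvStepA big st hd.1 = pvStepP st hd by simp [pvStepA, pvStepP, hhd]]
    exact ih (fun p hp => h p (by simp [hp])) _

-- projection lemmas: each component of A's dispatching step is exactly one filter step
lemma pvStepP_proj (st : PVS6) (kv : String × PVRow) :
    pvStepP st kv =
      (pvFilt "000000000-KGKJV" st.1 kv, pvFilt "000000000-KGTPY" st.2.1 kv,
       pvFilt "000000000-KGK8M" st.2.2.1 kv, pvFilt "000000000-KGMFM" st.2.2.2.1 kv,
       pvFilt "000000000-KGMYV" st.2.2.2.2.1 kv, pvFilt "000000000-KHNNM" st.2.2.2.2.2 kv) := by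
  unfold pvStepP pvFilt
  cases hr : (PySem.Dict.mk kv.2).get? "runID" with
  | none => rfl
  | some r =>
    by_cases h1 : r = "000000000-KGKJV"
    · subst h1; simp
    by_cases h2 : r = "000000000-KGTPY"
    · subst h2; simp
    by_cases h3 : r = "000000000-KGK8M"
    · subst h3; simp
    by_cases h4 : r = "000000000-KGMFM"
    · subst h4; simp
    by_cases h5 : r = "000000000-KGMYV"
    · subst h5; simp
    by_cases h6 : r = "000000000-KHNNM"
    · subst h6; simp
    simp [h1, h2, h3, h4, h5, h6]

-- the fold of the dispatching step decomposes into six independent filter folds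
lemma pvFoldP_proj : ∀ (l : List (String × PVRow)) (st : PVS6),
    l.foldl pvStepP st =
      (l.foldl (pvFilt "000000000-KGKJV") st.1, l.foldl (pvFilt "000000000-KGTPY") st.2.1,
       l.foldl (pvFilt "000000000-KGK8M") st.2.2.1, l.foldl (pvFilt "000000000-KGMFM") st.2.2.2.1,
       l.foldl (pvFilt "000000000-KGMYV") st.2.2.2.2.1, l.foldl (pvFilt "000000000-KHNNM") st.2.2.2.2.2) := by
  intro l
  induction l with
  | nil => intro st; rfl
  | cons hd tl ih =>
    intro st
    simp only [List.foldl_cons, pvStepP_proj]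
    exact ih _

-- ===== VERDICT (by name: the statement is the Claim_ definition above) =====
theorem sort_runs_spec : Claim_equal_sort_runs := by
  intro input_dict _ hpre
  obtain ⟨hnd, _⟩ := hpre
  unfold Spec_sort_runs sort_runs sort_runs_alt
  have hlook : ∀ p ∈ input_dict, (PySem.Dict.mk input_dict).get? p.1 = some p.2 := by
    intro p hp
    exact PySem.Dict.get?_of_mem_items (PySem.Dict.mk input_dict) (by simpa using hp)
      (by simpa [PySem.Dict.keys] using hnd)
  rw [pvFoldA_eq_foldP input_dict input_dict hlook, pvFoldP_proj]
  rfl
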